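-- pv_equiv track=rewrite | github.com/kms77/University | Semester III/Functional and Logical Programming/Laboratory 1/Problem 7.py | Equality_of_two_Lists
-- ===== SOURCE A (Python) =====
-- def Equality_of_two_Lists(First_List, Second_List):
--     if First_List == [] and Second_List == []:
--         return True
--     elif First_List == [] or Second_List == []:
--         return False
--     elif First_List[-1] != Second_List[-1]:
--         return False
--     else:
--         First_List.pop()
--         Second_List.pop()
--         return Equality_of_two_Lists(First_List, Second_List)
-- ===== SOURCE B (Python) =====
-- def Equality_of_two_Lists(First_List, Second_List):
--     # Note: unlike A, this does not mutate its arguments (A pops matched tails).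
--     return First_List == Second_List
-- ===== Notes on version B (the rewrite author's own statement) =====
-- stated objective: idiomatic
-- what changed: Replaces the tail-popping recursion with Python's built-in list equality comparison; equivalence is about the return value only (A destructively pops the matched tail of both argument lists, B does not mutate them).
import Mathlib
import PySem

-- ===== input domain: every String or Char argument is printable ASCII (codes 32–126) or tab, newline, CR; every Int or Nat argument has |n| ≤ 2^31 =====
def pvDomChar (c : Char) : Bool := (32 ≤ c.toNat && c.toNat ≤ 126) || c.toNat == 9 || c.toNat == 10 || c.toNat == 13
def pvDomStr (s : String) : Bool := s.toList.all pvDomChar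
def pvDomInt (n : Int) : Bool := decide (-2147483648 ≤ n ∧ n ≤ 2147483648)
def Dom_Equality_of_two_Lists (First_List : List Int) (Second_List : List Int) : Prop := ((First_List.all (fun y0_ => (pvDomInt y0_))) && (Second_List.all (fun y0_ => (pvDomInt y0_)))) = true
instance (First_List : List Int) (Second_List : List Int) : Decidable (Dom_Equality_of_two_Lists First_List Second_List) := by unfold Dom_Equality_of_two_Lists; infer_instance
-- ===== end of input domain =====

-- B replaces A's tail-popping recursion with a direct list-equality comparison (idiomatic); equivalence is about the RETURN value only: A destructively pops the matched tails of both argument lists, B does not mutate them.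


-- ===== PORT A =====
-- A recursively compares and pops last elements; port: [-1] via PySem.List.pyGet?, pop() via dropLast.
def Equality_of_two_Lists (First_List : List Int) (Second_List : List Int) : Bool :=
  if First_List = [] ∧ Second_List = [] then true
  else if First_List = [] ∨ Second_List = [] then false
  else if PySem.List.pyGet? First_List (-1) ≠ PySem.List.pyGet? Second_List (-1) then false
  else Equality_of_two_Lists First_List.dropLast Second_List.dropLast
termination_by First_List.length
decreasing_by
  rename_i h1 h2 h3
  have hn : First_List ≠ [] := fun h => h2 (Or.inl h)
  have := List.length_pos_of_ne_nil hn
  simp [List.length_dropLast]; omega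

-- ===== PORT B =====
-- B: Python's built-in list equality (return value only; A also mutates its arguments).
def Equality_of_two_Lists_alt (First_List : List Int) (Second_List : List Int) : Bool :=
  First_List == Second_List

-- ===== PRECONDITION & SPEC =====
def Spec_Equality_of_two_Lists (First_List : List Int) (Second_List : List Int) (out : Bool) : Prop := out = Equality_of_two_Lists_alt First_List Second_List
instance (First_List : List Int) (Second_List : List Int) (out : Bool) : Decidable (Spec_Equality_of_two_Lists First_List Second_List out) := by unfold Spec_Equality_of_two_Lists; infer_instance

-- ===== CLAIM (what is proved, stated in full; the proofs are below) =====
def Claim_equal_Equality_of_two_Lists : Prop := ∀ (First_List : List Int) (Second_List : List Int), Dom_Equality_of_two_Lists First_List Second_List → Spec_Equality_of_two_Lists First_List Second_List (Equality_of_two_Lists First_List Second_List)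

-- ===== LEMMAS AND PROOFS =====

-- ===== VERDICT (by name: the statement is the Claim_ definition above) =====
theorem pyGet_neg_one (l : List Int) (h : l ≠ []) :
    PySem.List.pyGet? l (-1) = l.getLast? := by
  have := List.length_pos_of_ne_nil h
  have h1 : 1 ≤ l.length := this
  simp [PySem.List.pyGet?, PySem.List.pyIdx?, h1, List.getLast?_eq_getElem?]

theorem eq_iff_beq (l1 l2 : List Int) :
    Equality_of_two_Lists l1 l2 = (l1 == l2) := by
  fun_induction Equality_of_two_Lists l1 l2 with
  | case1 l1 l2 h => simp [h.1, h.2]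
  | case2 l1 l2 h1 h2 =>
    rcases h2 with h | h
    · cases l2 with
      | nil => exact absurd ⟨h, rfl⟩ h1
      | cons a t => simp [h]
    · cases l1 with
      | nil => exact absurd ⟨rfl, h⟩ h1
      | cons a t => simp [h]
  | case3 l1 l2 h1 h2 h3 =>
    have hn1 : l1 ≠ [] := fun h => h2 (Or.inl h)
    have hn2 : l2 ≠ [] := fun h => h2 (Or.inr h)
    rw [pyGet_neg_one l1 hn1, pyGet_neg_one l2 hn2] at h3
    symm; simp only [beq_eq_false_iff_ne, ne_eq]
    intro heq; exact h3 (by rw [heq])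
  | case4 l1 l2 h1 h2 h3 ih =>
    have hn1 : l1 ≠ [] := fun h => h2 (Or.inl h)
    have hn2 : l2 ≠ [] := fun h => h2 (Or.inr h)
    rw [pyGet_neg_one l1 hn1, pyGet_neg_one l2 hn2, not_not] at h3
    rw [ih]
    show (l1.dropLast == l2.dropLast) = (l1 == l2)
    rw [Bool.eq_iff_iff]
    simp only [beq_iff_eq]
    constructor
    · intro h
      have hl := h3
      rw [List.getLast?_eq_some_getLast hn1, List.getLast?_eq_some_getLast hn2] at hl
      rw [← List.dropLast_concat_getLast hn1, ← List.dropLast_concat_getLast hn2, h,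
        Option.some_inj.mp hl]
    · intro h; rw [h]

theorem Equality_of_two_Lists_spec : Claim_equal_Equality_of_two_Lists := by
  intro l1 l2 _
  unfold Spec_Equality_of_two_Lists Equality_of_two_Lists_alt
  exact eq_iff_beq l1 l2
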